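-- pv_equiv track=rewrite | github.com/mjhopkins88-oss/btr-prospecting | workers/analysis/capital_flow_engine.py | calculate_capital_confidence
-- ===== SOURCE A (Python) =====
-- EVENT_WEIGHTS = {
--     'CONSTRUCTION_LOAN': 25,
--     'LAND_ACQUISITION_LOAN': 20,
--     'DEBT_PLACEMENT': 15,
--     'EQUITY_INVESTMENT': 20,
--     'JOINT_VENTURE': 15,
--     'FUND_DEPLOYMENT': 15,
-- }
--
-- def calculate_capital_confidence(events, signals, has_dna_match=False, has_parcel_match=False):
--     """
--     Calculate confidence score for capital deployment prediction.
--     Formula: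
--       (loan_signal * 25) + (equity_signal * 20) + (jv_signal * 15)
--       + (developer_dna_match * 10) + (parcel_probability_match * 10)
--     Capped at 100.
--     """
--     score = 0
--
--     # Event-based scoring
--     event_types_seen = set()
--     for e in events:
--         etype = e.get('event_type', '')
--         if etype not in event_types_seen:
--             score += EVENT_WEIGHTS.get(etype, 10)
--             event_types_seen.add(etype)
--
--     # Signal corroboration bonus
--     signal_types_seen = set(s.get('signal_type', '') for s in signals)
--     if len(signal_types_seen) >= 2:
--         score += 10  # multiple signal sources bonus
--
--     # DNA match bonus
--     if has_dna_match:
--         score += 10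
--
--     # Parcel match bonus
--     if has_parcel_match:
--         score += 10
--
--     return min(score, 100)
-- ===== SOURCE B (Python) =====
-- EVENT_WEIGHTS = {
--     'CONSTRUCTION_LOAN': 25,
--     'LAND_ACQUISITION_LOAN': 20,
--     'DEBT_PLACEMENT': 15,
--     'EQUITY_INVESTMENT': 20,
--     'JOINT_VENTURE': 15,
--     'FUND_DEPLOYMENT': 15,
-- }
--
-- def calculate_capital_confidence(events, signals, has_dna_match=False, has_parcel_match=False):
--     types = [e.get('event_type', '') for e in events]
--     # Inverted iteration: scan the fixed weight table for presence in the events,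
--     # then pay the default weight once per distinct unknown type.
--     score = sum(w for t, w in EVENT_WEIGHTS.items() if t in types)
--     score += 10 * len({t for t in types if t not in EVENT_WEIGHTS})
--     # >= 2 distinct signal types iff some later signal type differs from the first
--     sigs = [s.get('signal_type', '') for s in signals]
--     if sigs and any(t != sigs[0] for t in sigs[1:]):
--         score += 10
--     if has_dna_match:
--         score += 10
--     if has_parcel_match:
--         score += 10
--     return min(score, 100)
-- ===== Notes on version B (the rewrite author's own statement) =====
-- stated objective: alternative
-- what changed: Inverts the event loop: instead of deduping events while summing, B scans the fixed 6-entry weight table for types present in the events and adds the default weight once per distinct unknown type; the multi-signal bonus is detected as 'some later signal type differs from the first' instead of building a set and counting it.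
import Mathlib
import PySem

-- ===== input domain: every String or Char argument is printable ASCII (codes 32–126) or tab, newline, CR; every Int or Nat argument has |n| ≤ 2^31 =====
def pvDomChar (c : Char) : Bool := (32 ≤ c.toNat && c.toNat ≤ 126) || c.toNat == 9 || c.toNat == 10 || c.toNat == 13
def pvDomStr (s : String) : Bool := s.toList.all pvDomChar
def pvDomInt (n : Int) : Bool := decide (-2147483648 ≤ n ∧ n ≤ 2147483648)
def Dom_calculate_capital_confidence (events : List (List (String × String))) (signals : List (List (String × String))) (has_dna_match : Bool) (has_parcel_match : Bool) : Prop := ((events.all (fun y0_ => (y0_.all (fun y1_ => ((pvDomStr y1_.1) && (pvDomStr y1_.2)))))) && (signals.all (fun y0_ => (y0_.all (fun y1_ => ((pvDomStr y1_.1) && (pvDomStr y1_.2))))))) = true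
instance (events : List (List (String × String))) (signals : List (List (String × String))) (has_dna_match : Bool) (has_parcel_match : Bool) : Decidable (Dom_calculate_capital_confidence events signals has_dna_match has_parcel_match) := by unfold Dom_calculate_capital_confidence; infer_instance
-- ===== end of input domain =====

-- B inverts the event loop: it scans the fixed weight table for types present in the events
-- and pays the default weight once per distinct unknown type, instead of A's dedup-while-summing
-- pass; the multi-signal bonus becomes "some later signal type differs from the first".

-- ===== PORT A =====
def pvWeights : PySem.Dict String Int := PySem.Dict.ofList
  [("CONSTRUCTION_LOAN", 25), ("LAND_ACQUISITION_LOAN", 20), ("DEBT_PLACEMENT", 15),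
   ("EQUITY_INVESTMENT", 20), ("JOINT_VENTURE", 15), ("FUND_DEPLOYMENT", 15)]

def calculate_capital_confidence (events : List (List (String × String))) (signals : List (List (String × String))) (has_dna_match : Bool) (has_parcel_match : Bool) : Int :=
  let score : Int := 0
  -- for e in events: dedup-and-sum in one pass
  let st := events.foldl (fun (st : Int × PySem.Set String) e =>
      let etype := PySem.Dict.getD (PySem.Dict.mk e) "event_type" ""
      if PySem.Set.contains st.2 etype then st
      else (st.1 + PySem.Dict.getD pvWeights etype 10, PySem.Set.add st.2 etype))
    (score, PySem.Set.empty)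
  let score := st.1
  let signal_types_seen : PySem.Set String :=
    PySem.Set.ofList (signals.map (fun s => PySem.Dict.getD (PySem.Dict.mk s) "signal_type" ""))
  let score := if 2 ≤ PySem.Set.len signal_types_seen then score + 10 else score
  let score := if has_dna_match then score + 10 else score
  let score := if has_parcel_match then score + 10 else score
  min score 100

-- ===== PORT B =====
def calculate_capital_confidence_alt (events : List (List (String × String))) (signals : List (List (String × String))) (has_dna_match : Bool) (has_parcel_match : Bool) : Int :=
  let types := events.map (fun e => PySem.Dict.getD (PySem.Dict.mk e) "event_type" "")
  -- sum(w for t, w in EVENT_WEIGHTS.items() if t in types)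
  let score : Int := (PySem.Dict.items pvWeights).foldl
      (fun acc tw => if tw.1 ∈ types then acc + tw.2 else acc) 0
  -- + 10 * len({t for t in types if t not in EVENT_WEIGHTS})
  let score := score + 10 *
      (PySem.Set.len (PySem.Set.ofList (types.filter (fun t => !(PySem.Dict.contains pvWeights t)))) : Int)
  let sigs := signals.map (fun s => PySem.Dict.getD (PySem.Dict.mk s) "signal_type" "")
  -- if sigs and any(t != sigs[0] for t in sigs[1:]): score += 10
  let score := match sigs with
    | [] => score
    | h :: rest => if rest.any (fun t => t != h) then score + 10 else score
  let score := if has_dna_match then score + 10 else score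
  let score := if has_parcel_match then score + 10 else score
  min score 100

-- ===== PRECONDITION & SPEC =====
def Spec_calculate_capital_confidence (events : List (List (String × String))) (signals : List (List (String × String))) (has_dna_match : Bool) (has_parcel_match : Bool) (out : Int) : Prop := out = calculate_capital_confidence_alt events signals has_dna_match has_parcel_match
instance (events : List (List (String × String))) (signals : List (List (String × String))) (has_dna_match : Bool) (has_parcel_match : Bool) (out : Int) : Decidable (Spec_calculate_capital_confidence events signals has_dna_match has_parcel_match out) := by unfold Spec_calculate_capital_confidence; infer_instance

-- ===== CLAIM (what is proved, stated in full; the proofs are below) =====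
def Claim_equal_calculate_capital_confidence : Prop := ∀ (events : List (List (String × String))) (signals : List (List (String × String))) (has_dna_match : Bool) (has_parcel_match : Bool), Dom_calculate_capital_confidence events signals has_dna_match has_parcel_match → Spec_calculate_capital_confidence events signals has_dna_match has_parcel_match (calculate_capital_confidence events signals has_dna_match has_parcel_match)

-- ===== LEMMAS AND PROOFS =====

-- A's fused loop = accumulator + (w-sum over the seen-set after) − (w-sum over the seen-set before)
lemma loopA_eq (w : String → Int) (l : List String) (acc : Int) (seen : PySem.Set String) :
    (l.foldl (fun st t => if PySem.Set.contains st.2 t then st else (st.1 + w t, PySem.Set.add st.2 t)) (acc, seen)).1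
      = acc + (l.foldl PySem.Set.add seen).foldl (fun a t => a + w t) 0
          - seen.foldl (fun a t => a + w t) 0 := by
  induction l generalizing acc seen with
  | nil => simp
  | cons t l ih =>
    simp only [List.foldl]
    split_ifs with h
    · have hm : t ∈ seen := by simpa using h
      have hadd : PySem.Set.add seen t = seen := by simp [PySem.Set.add, hm]
      rw [hadd]
      exact ih acc seen
    · have hm : t ∉ seen := by simpa using h
      have hadd : PySem.Set.add seen t = seen ++ [t] := by simp [PySem.Set.add, hm]
      rw [hadd, ih (acc + w t) (seen ++ [t])]
      have hsum : (seen ++ [t]).foldl (fun a t => a + w t) 0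
          = seen.foldl (fun a t => a + w t) 0 + w t := by
        rw [List.foldl_append]
        simp only [List.foldl]
      rw [hsum]
      ring

-- splitting an if-membership sum at a fresh head element
lemma sum_if_cons (K : List (String × Int)) (t : String) (S : List String) (ht : t ∉ S) :
    (K.map (fun tw => if tw.1 ∈ t :: S then tw.2 else 0)).sum
      = (K.map (fun tw => if tw.1 ∈ S then tw.2 else 0)).sum
        + (K.map (fun tw => if tw.1 = t then tw.2 else 0)).sum := by
  induction K with
  | nil => simp
  | cons kw K ih =>
    simp only [List.map, List.sum_cons, ih]
    by_cases h1 : kw.1 = t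
    · have : kw.1 ∉ S := h1 ▸ ht
      simp [h1, this, ht]; ring
    · by_cases h2 : kw.1 ∈ S <;> simp [h1, h2] <;> ring

-- per-element: A's weight lookup = keyed sum over the table + default for unknown keys
lemma weight_split (t : String) :
    PySem.Dict.getD pvWeights t 10
      = ((PySem.Dict.items pvWeights).map (fun tw => if tw.1 = t then tw.2 else 0)).sum
        + (if PySem.Dict.contains pvWeights t then 0 else 10) := by
  by_cases h1 : t = "CONSTRUCTION_LOAN"; · subst h1; decide
  by_cases h2 : t = "LAND_ACQUISITION_LOAN"; · subst h2; decide
  by_cases h3 : t = "DEBT_PLACEMENT"; · subst h3; decide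
  by_cases h4 : t = "EQUITY_INVESTMENT"; · subst h4; decide
  by_cases h5 : t = "JOINT_VENTURE"; · subst h5; decide
  by_cases h6 : t = "FUND_DEPLOYMENT"; · subst h6; decide
  have hi : PySem.Dict.items pvWeights =
      [("CONSTRUCTION_LOAN", 25), ("LAND_ACQUISITION_LOAN", 20), ("DEBT_PLACEMENT", 15),
       ("EQUITY_INVESTMENT", 20), ("JOINT_VENTURE", 15), ("FUND_DEPLOYMENT", 15)] := by decide
  simp [PySem.Dict.getD, PySem.Dict.get?, PySem.Dict.contains, hi,
        Ne.symm h1, Ne.symm h2, Ne.symm h3, Ne.symm h4, Ne.symm h5, Ne.symm h6]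

-- nodup-set sum of A's weights = table scan + 10 per unknown element
lemma sumW (S : List String) (hS : S.Nodup) :
    S.foldl (fun a t => a + PySem.Dict.getD pvWeights t 10) 0
      = ((PySem.Dict.items pvWeights).map (fun tw => if tw.1 ∈ S then tw.2 else 0)).sum
        + 10 * ((S.filter (fun t => !(PySem.Dict.contains pvWeights t))).length : Int) := by
  induction S with
  | nil => simp
  | cons t S ih =>
    have ht : t ∉ S := (List.nodup_cons.mp hS).1
    have hS' : S.Nodup := (List.nodup_cons.mp hS).2
    rw [PySem.List.foldl_add, List.map_cons, List.sum_cons,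
        sum_if_cons _ _ _ ht, weight_split t]
    have := ih hS'
    rw [PySem.List.foldl_add] at this
    simp only [zero_add] at this ⊢
    rw [this]
    by_cases hc : PySem.Dict.contains pvWeights t <;> simp [hc, List.filter_cons] <;> ring

-- ofList commutes with filter
lemma ofList_filter (p : String → Bool) (xs : List String) (acc : PySem.Set String) :
    (xs.foldl PySem.Set.add acc).filter p = (xs.filter p).foldl PySem.Set.add (acc.filter p) := by
  induction xs generalizing acc with
  | nil => simp
  | cons x xs ih =>
    simp only [List.foldl, List.filter_cons]
    have hstep : (PySem.Set.add acc x).filter p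
        = if p x then PySem.Set.add (acc.filter p) x else acc.filter p := by
      by_cases hm : x ∈ acc
      · rw [PySem.Set.add_of_mem hm]
        by_cases hp : p x
        · rw [if_pos hp, PySem.Set.add_of_mem (List.mem_filter.mpr ⟨hm, hp⟩)]
        · rw [if_neg (by simp [hp])]
      · rw [PySem.Set.add_of_not_mem hm, List.filter_append]
        by_cases hp : p x
        · rw [if_pos hp, PySem.Set.add_of_not_mem (fun h => hm (List.mem_filter.mp h).1)]
          simp [hp]
        · rw [if_neg (by simp [hp])]; simp [hp]
    rw [ih, hstep]
    by_cases hp : p x <;> simp [hp, List.foldl]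

-- adding only already-present elements leaves a set unchanged
lemma foldl_add_of_subset (rest : List String) (acc : PySem.Set String)
    (hacc : ∀ t ∈ rest, t ∈ acc) : rest.foldl PySem.Set.add acc = acc := by
  induction rest generalizing acc with
  | nil => rfl
  | cons r rs ihr =>
    simp only [List.foldl]
    rw [PySem.Set.add_of_mem (hacc r (by simp))]
    exact ihr acc (fun t ht => hacc t (by simp [ht]))

-- the signals test: ≥ 2 distinct types ⇔ some later type differs from the first
lemma signals_iff (sigs : List String) :
    (2 ≤ PySem.Set.len (PySem.Set.ofList sigs))
      ↔ (match sigs with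
          | [] => False
          | h :: rest => rest.any (fun t => t != h) = true) := by
  cases sigs with
  | nil => simp [PySem.Set.ofList, PySem.Set.len]
  | cons h rest =>
    constructor
    · intro hlen
      show rest.any (fun t => t != h) = true
      by_cases hb : rest.any (fun t => t != h) = true
      · exact hb
      · exfalso
        have hall : ∀ t ∈ rest, t = h := by
          intro t ht
          by_contra hne
          exact hb (List.any_eq_true.mpr ⟨t, ht, by simp [hne]⟩)
        have hone : PySem.Set.ofList (h :: rest) = [h] := by
          rw [PySem.Set.ofList_eq_foldl]
          simp only [List.foldl]
          exact foldl_add_of_subset rest [h] (fun t ht => by simp [hall t ht])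
        rw [hone] at hlen
        simp [PySem.Set.len] at hlen
    · intro hb
      rcases List.any_eq_true.mp hb with ⟨t, ht, hne'⟩
      have hne : t ≠ h := by simpa using hne'
      have h1 : h ∈ PySem.Set.ofList (h :: rest) := by rw [PySem.Set.mem_ofList]; simp
      have h2 : t ∈ PySem.Set.ofList (h :: rest) := by rw [PySem.Set.mem_ofList]; simp [ht]
      rcases hl : PySem.Set.ofList (h :: rest) with _ | ⟨a, _ | ⟨b, l⟩⟩
      · rw [hl] at h1; simp at h1
      · rw [hl] at h1 h2
        simp at h1 h2
        exact absurd (h2.trans h1.symm) hne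
      · simp only [PySem.Set.len, List.length_cons]
        omega

-- ===== VERDICT (by name: the statement is the Claim_ definition above) =====
theorem calculate_capital_confidence_spec : Claim_equal_calculate_capital_confidence := by
  intro events signals dna parcel _hDom
  unfold Spec_calculate_capital_confidence
  unfold calculate_capital_confidence calculate_capital_confidence_alt
  simp only []
  set types := events.map (fun e => PySem.Dict.getD (PySem.Dict.mk e) "event_type" "") with htypes
  -- event part
  have hfold : events.foldl (fun (st : Int × PySem.Set String) e =>
      let etype := PySem.Dict.getD (PySem.Dict.mk e) "event_type" ""
      if PySem.Set.contains st.2 etype then st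
      else (st.1 + PySem.Dict.getD pvWeights etype 10, PySem.Set.add st.2 etype))
      ((0:Int), PySem.Set.empty)
    = types.foldl
        (fun st t => if PySem.Set.contains st.2 t then st
          else (st.1 + PySem.Dict.getD pvWeights t 10, PySem.Set.add st.2 t))
        ((0:Int), PySem.Set.empty) := by
    rw [htypes, List.foldl_map]
  rw [hfold, loopA_eq]
  have hS : (types.foldl PySem.Set.add PySem.Set.empty) = PySem.Set.ofList types :=
    (PySem.Set.ofList_eq_foldl types).symm
  rw [hS]
  rw [sumW _ (PySem.Set.nodup_ofList types)]
  have hmem : ((PySem.Dict.items pvWeights).map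
        (fun tw => if tw.1 ∈ PySem.Set.ofList types then tw.2 else 0)).sum
      = ((PySem.Dict.items pvWeights).map (fun tw => if tw.1 ∈ types then tw.2 else 0)).sum := by
    congr 1
    apply List.map_congr_left
    intro tw _
    by_cases hmm : tw.1 ∈ types
    · rw [if_pos hmm, if_pos ((PySem.Set.mem_ofList _ _).mpr hmm)]
    · rw [if_neg hmm, if_neg (fun hx => hmm ((PySem.Set.mem_ofList _ _).mp hx))]
  have hBfold : (PySem.Dict.items pvWeights).foldl
      (fun (acc : Int) tw => if tw.1 ∈ types then acc + tw.2 else acc) 0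
      = ((PySem.Dict.items pvWeights).map (fun tw => if tw.1 ∈ types then tw.2 else 0)).sum := by
    have hgen : ∀ (K : List (String × Int)) (a : Int), K.foldl
        (fun (acc : Int) tw => if tw.1 ∈ types then acc + tw.2 else acc) a
      = a + (K.map (fun tw => if tw.1 ∈ types then tw.2 else 0)).sum := by
      intro K
      induction K with
      | nil => simp
      | cons kw K ih =>
        intro a
        simp only [List.foldl, List.map, List.sum_cons]
        by_cases h : kw.1 ∈ types <;> simp [h, ih] <;> ring
    simpa using hgen (PySem.Dict.items pvWeights) 0
  have hfilter : (PySem.Set.ofList types).filter (fun t => !(PySem.Dict.contains pvWeights t))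
      = PySem.Set.ofList (types.filter (fun t => !(PySem.Dict.contains pvWeights t))) := by
    rw [PySem.Set.ofList_eq_foldl, PySem.Set.ofList_eq_foldl, ofList_filter]
    rfl
  rw [hmem, ← hBfold, hfilter]
  -- signals part
  cases hcase : signals.map (fun s => PySem.Dict.getD (PySem.Dict.mk s) "signal_type" "") with
  | nil =>
    have hA : ¬ (2 ≤ PySem.Set.len (PySem.Set.ofList ([] : List String))) := by decide
    cases dna <;> cases parcel <;> simp [hA] <;> ring_nf
  | cons h rest =>
    have hsig := signals_iff (h :: rest)
    by_cases hb : rest.any (fun t => t != h) = true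
    · have hA : 2 ≤ PySem.Set.len (PySem.Set.ofList (h :: rest)) := hsig.mpr hb
      have hA' : 2 ≤ (PySem.Set.ofList (h :: rest)).length := by
        simpa [PySem.Set.len] using hA
      cases dna <;> cases parcel <;> simp [hA', hb] <;> ring_nf
    · have hA : ¬ (2 ≤ PySem.Set.len (PySem.Set.ofList (h :: rest))) := fun hh => hb (hsig.mp hh)
      have hA' : ¬ (2 ≤ (PySem.Set.ofList (h :: rest)).length) := by
        intro hh
        exact hA (by simp [PySem.Set.len]; omega)
      cases dna <;> cases parcel <;> simp [hA', hb] <;> ring_nf
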